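-- pv_equiv track=rewrite | github.com/ttzytt/PyAutoGrade | tests/Block 4/tested_code/19/Unit 1/cards/card_functions.py | uno_who_played_what
-- ===== SOURCE A (Python) =====
-- def uno_who_played_what(cards_played):
--     card_played_position = 0
--     player_position = 100000
--     hands = [[], [], [], []]
--     skip_1 = 0
--     reverse_count = 0
--
--     while card_played_position < len(cards_played):
--         if skip_1 == 1:
--             player_position += 1
--             skip_1 = 0
--             if reverse_count % 2 == 1:
--                 player_position -= 4
--         elif cards_played[card_played_position] == "skip":
--             skip_1 = 1
--             hands[(player_position % 4)].append("skip")
--             card_played_position += 1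
--             player_position += 1
--         elif cards_played[card_played_position] == 'reverse':
--             reverse_count += 1
--             hands[(player_position % 4)].append("reverse")
--             card_played_position += 1
--             if reverse_count % 2 == 1:
--                 player_position -= 1
--             else:
--                 player_position += 1
--         else:
--             hands[(player_position % 4)].append(cards_played[card_played_position])
--             card_played_position += 1
--             player_position += 1
--             if reverse_count % 2 == 1:
--                 player_position -= 2
--
--     return hands
-- ===== SOURCE B (Python) =====
-- def uno_who_played_what(cards_played):
--     # Compute the seat of each card in one scan, then group cards by seat.
--     seats = []
--     player, direction = 0, 1
--     for card in cards_played: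
--         seats.append(player)
--         if card == 'reverse':
--             direction = -direction
--             player = (player + direction) % 4
--         elif card == 'skip':
--             player = (player + 2 * direction) % 4
--         else:
--             player = (player + direction) % 4
--     return [[c for c, s in zip(cards_played, seats) if s == k] for k in range(4)]
-- ===== Notes on version B (the rewrite author's own statement) =====
-- stated objective: simpler
-- what changed: A's while-loop over an index with a 100000 position sentinel, a two-phase skip_1 flag (an extra loop iteration per skip) and a reverse-parity counter is replaced by a single scan keeping an explicit (player, direction) pair to compute each card's seat, followed by grouping the cards by seat.
import Mathlib
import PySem

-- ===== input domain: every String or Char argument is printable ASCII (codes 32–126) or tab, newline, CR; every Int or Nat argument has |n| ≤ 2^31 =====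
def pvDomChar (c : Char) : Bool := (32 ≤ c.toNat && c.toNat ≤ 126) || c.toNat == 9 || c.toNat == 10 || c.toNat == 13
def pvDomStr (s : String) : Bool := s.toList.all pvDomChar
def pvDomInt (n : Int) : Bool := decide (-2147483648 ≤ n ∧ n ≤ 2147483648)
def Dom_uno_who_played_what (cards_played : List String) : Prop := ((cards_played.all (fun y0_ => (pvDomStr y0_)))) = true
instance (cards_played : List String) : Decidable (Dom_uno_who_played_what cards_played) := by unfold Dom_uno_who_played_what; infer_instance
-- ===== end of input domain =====

-- B replaces A's sentinel-position / skip-flag / reverse-parity while-loop by one scan that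
-- computes each card's seat, then groups the cards by seat (objective: simpler).

-- ===== PORT A =====
-- A's while loop: state (card index i, player_position pos, skip_1 flag, reverse_count rev, hands);
-- the skip_1 branch is an extra iteration that consumes no card, hence the lexicographic measure.
def unoLoopA (cards : List String) (i : Nat) (pos : Int) (skip1 : Nat) (rev : Nat)
    (hands : List (List String)) : List (List String) :=
  if _h : i < cards.length then
    if skip1 = 1 then
      unoLoopA cards i (if rev % 2 = 1 then pos + 1 - 4 else pos + 1) 0 rev hands
    else
      if cards.getD i "" = "skip" then
        unoLoopA cards (i + 1) (pos + 1) 1 rev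
          (hands.modify (PySem.Int.mod pos 4).toNat (· ++ ["skip"]))
      else if cards.getD i "" = "reverse" then
        unoLoopA cards (i + 1) (if (rev + 1) % 2 = 1 then pos - 1 else pos + 1) skip1 (rev + 1)
          (hands.modify (PySem.Int.mod pos 4).toNat (· ++ ["reverse"]))
      else
        unoLoopA cards (i + 1) (if rev % 2 = 1 then pos + 1 - 2 else pos + 1) skip1 rev
          (hands.modify (PySem.Int.mod pos 4).toNat (· ++ [cards.getD i ""]))
  else hands
termination_by (cards.length - i, skip1)
decreasing_by all_goals (simp_all [Prod.lex_iff]; try omega)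

def uno_who_played_what (cards_played : List String) : List (List String) :=
  unoLoopA cards_played 0 100000 0 0 [[], [], [], []]

-- ===== PORT B =====
-- one scan computing the seat (0..3) at which each card is played
def unoSeats (player direction : Int) : List String → List Int
  | [] => []
  | c :: rest =>
    player ::
      (if c = "reverse" then
        unoSeats (PySem.Int.mod (player + -direction) 4) (-direction) rest
      else if c = "skip" then
        unoSeats (PySem.Int.mod (player + 2 * direction) 4) direction rest
      else
        unoSeats (PySem.Int.mod (player + direction) 4) direction rest)

def uno_who_played_what_alt (cards_played : List String) : List (List String) :=
  let seats := unoSeats 0 1 cards_played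
  (List.range 4).map (fun k =>
    ((cards_played.zip seats).filter (fun p => p.2 == (k : Int))).map Prod.fst)

-- ===== PRECONDITION & SPEC =====
def Spec_uno_who_played_what (cards_played : List String) (out : List (List String)) : Prop := out = uno_who_played_what_alt cards_played
instance (cards_played : List String) (out : List (List String)) : Decidable (Spec_uno_who_played_what cards_played out) := by unfold Spec_uno_who_played_what; infer_instance

-- ===== CLAIM (what is proved, stated in full; the proofs are below) =====
def Claim_equal_uno_who_played_what : Prop := ∀ (cards_played : List String), Dom_uno_who_played_what cards_played → Spec_uno_who_played_what cards_played (uno_who_played_what cards_played)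

-- ===== LEMMAS AND PROOFS =====

-- proof-side: apply a list of (card, seat) pairs to the hands, in order
def applyPairs (hands : List (List String)) : List (String × Int) → List (List String)
  | [] => hands
  | (c, s) :: rest => applyPairs (hands.modify s.toNat (· ++ [c])) rest

-- the direction encoded by A's reverse_count parity
def dirOf (rev : Nat) : Int := if rev % 2 = 1 then -1 else 1

theorem mod4_bounds (pos : Int) :
    PySem.Int.mod pos 4 = 0 ∨ PySem.Int.mod pos 4 = 1 ∨
    PySem.Int.mod pos 4 = 2 ∨ PySem.Int.mod pos 4 = 3 := by
  simp only [PySem.Int.mod_eq_emod_of_pos (b := 4) (by omega)]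
  omega

theorem unoSeats_mem (cards : List String) :
    ∀ p d, (p = 0 ∨ p = 1 ∨ p = 2 ∨ p = 3) → ∀ s ∈ unoSeats p d cards,
      s = 0 ∨ s = 1 ∨ s = 2 ∨ s = 3 := by
  induction cards with
  | nil => intro p d hp s hs; simp [unoSeats] at hs
  | cons c rest ih =>
    intro p d hp s hs
    simp only [unoSeats, List.mem_cons] at hs
    rcases hs with rfl | hs
    · exact hp
    · split_ifs at hs <;> exact ih _ _ (mod4_bounds _) s hs

-- A's loop, entered with skip_1 = 0, applies exactly the (card, seat) pairs of the suffix
theorem unoLoopA_eq_applyPairs (cards : List String) :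
    ∀ n i pos rev hands, cards.length - i ≤ n →
      unoLoopA cards i pos 0 rev hands =
        applyPairs hands ((cards.drop i).zip
          (unoSeats (PySem.Int.mod pos 4) (dirOf rev) (cards.drop i))) := by
  intro n
  induction n with
  | zero =>
    intro i pos rev hands hn
    rw [unoLoopA, dif_neg (by omega), List.drop_eq_nil_of_le (by omega)]
    rfl
  | succ n ih =>
    intro i pos rev hands hn
    by_cases hi : i < cards.length
    · have hdrop : cards.drop i = cards.getD i "" :: cards.drop (i + 1) := by
        rw [List.getD_eq_getElem _ _ hi]
        exact List.drop_eq_getElem_cons hi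
      rw [unoLoopA, dif_pos hi, if_neg (by decide)]
      rw [hdrop]
      by_cases hskip : cards.getD i "" = "skip"
      · -- the skip card, then the pending skip_1 iteration (if a card remains)
        rw [if_pos hskip, hskip]
        rw [unoLoopA]
        by_cases hi1 : i + 1 < cards.length
        · rw [dif_pos hi1, if_pos rfl, ih (i+1) _ rev _ (by omega)]
          rcases Nat.mod_two_eq_zero_or_one rev with hpar | hpar <;>
            simp only [unoSeats, List.zip_cons_cons, applyPairs, dirOf, hpar] <;>
            norm_num <;>
            (try rw [if_neg (show ¬("skip":String) = "reverse" by decide)]) <;> ring_nf <;>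
            (try (congr 1 <;> try (congr 1 <;> try (congr 1)))) <;> omega
        · rw [dif_neg hi1]
          have h2 : cards.drop (i+1) = [] := List.drop_eq_nil_of_le (by omega)
          simp [unoSeats, applyPairs, h2]
      · rw [if_neg hskip]
        by_cases hrev : cards.getD i "" = "reverse"
        · rw [if_pos hrev, hrev, ih (i+1) _ (rev+1) _ (by omega)]
          have hpar2 : (rev + 1) % 2 = (if rev % 2 = 1 then 0 else 1) := by split_ifs <;> omega
          rcases Nat.mod_two_eq_zero_or_one rev with hpar | hpar <;>
            simp only [unoSeats, List.zip_cons_cons, applyPairs, dirOf, hpar2, hpar] <;>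
            norm_num <;> ring_nf
        · rw [if_neg hrev, ih (i+1) _ rev _ (by omega)]
          rcases Nat.mod_two_eq_zero_or_one rev with hpar | hpar <;>
            simp only [unoSeats, List.zip_cons_cons, applyPairs, dirOf, hpar,
              if_neg hrev, if_neg hskip] <;>
            norm_num <;> ring_nf
    · rw [unoLoopA, dif_neg hi, List.drop_eq_nil_of_le (by omega)]
      rfl

-- applying pairs whose seats lie in 0..3 to four hands = grouping the pairs by seat
theorem applyPairs_group :
    ∀ (ps : List (String × Int)) (h0 h1 h2 h3 : List String),
      (∀ p ∈ ps, p.2 = 0 ∨ p.2 = 1 ∨ p.2 = 2 ∨ p.2 = 3) →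
      applyPairs [h0, h1, h2, h3] ps =
        [h0 ++ (ps.filter (fun p => p.2 == (0:Int))).map Prod.fst,
         h1 ++ (ps.filter (fun p => p.2 == (1:Int))).map Prod.fst,
         h2 ++ (ps.filter (fun p => p.2 == (2:Int))).map Prod.fst,
         h3 ++ (ps.filter (fun p => p.2 == (3:Int))).map Prod.fst] := by
  intro ps
  induction ps with
  | nil => intro h0 h1 h2 h3 _; simp [applyPairs]
  | cons p rest ih =>
    intro h0 h1 h2 h3 hmem
    obtain ⟨c, s⟩ := p
    rcases hmem ⟨c, s⟩ (by simp) with rfl | rfl | rfl | rfl <;>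
      · simp only [applyPairs, List.modify, List.modifyTailIdx, List.modifyTailIdx.go,
          List.modifyHead, Int.toNat]
        rw [ih _ _ _ _ (fun q hq => hmem q (by simp [hq]))]
        simp [List.filter_cons]

-- ===== VERDICT (by name: the statement is the Claim_ definition above) =====
theorem uno_who_played_what_spec : Claim_equal_uno_who_played_what := by
  intro cards _
  show uno_who_played_what cards = uno_who_played_what_alt cards
  unfold uno_who_played_what uno_who_played_what_alt
  rw [unoLoopA_eq_applyPairs cards cards.length 0 100000 0 _ (by omega)]
  simp only [List.drop_zero]
  rw [show PySem.Int.mod 100000 4 = 0 from by decide, show dirOf 0 = 1 from by decide]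
  rw [applyPairs_group _ [] [] [] []
    (fun p hp => unoSeats_mem cards 0 1 (by norm_num) p.2 (List.of_mem_zip hp).2)]
  rw [show List.range 4 = [0,1,2,3] from rfl]
  norm_num
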